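-- pv_equiv track=rewrite | github.com/pilikov/NewType | src/crawlers/myfonts_api.py | _ordered_unique_scripts
-- ===== SOURCE A (Python) =====
-- _SCRIPT_ORDER = [
--     "Latin",
--     "Cyrillic",
--     "Greek",
--     "Arabic",
--     "Hebrew",
--     "Devanagari",
--     "Thai",
--     "Japanese",
--     "Korean",
--     "Chinese",
-- ]
--
-- def _ordered_unique_scripts(values: list[str]) -> list[str]:
--     seen: set[str] = set()
--     canonical: list[str] = []
--     for value in values:
--         normalized = str(value or "").strip()
--         if not normalized:
--             continue
--         # normalize to canonical labels from order table
--         label = next((s for s in _SCRIPT_ORDER if s.lower() == normalized.lower()), normalized)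
--         key = label.lower()
--         if key in seen:
--             continue
--         seen.add(key)
--         canonical.append(label)
--
--     order_index = {name: idx for idx, name in enumerate(_SCRIPT_ORDER)}
--     return sorted(canonical, key=lambda v: order_index.get(v, len(_SCRIPT_ORDER)))
-- ===== SOURCE B (Python) =====
-- _SCRIPT_ORDER = [
--     "Latin",
--     "Cyrillic",
--     "Greek",
--     "Arabic",
--     "Hebrew",
--     "Devanagari",
--     "Thai",
--     "Japanese",
--     "Korean",
--     "Chinese",
-- ]
--
-- def _ordered_unique_scripts(values: list[str]) -> list[str]:
--     lower_order = [s.lower() for s in _SCRIPT_ORDER]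
--     seen: set[str] = set()
--     known_keys: set[str] = set()
--     unknown: list[str] = []
--     for value in values:
--         normalized = str(value or "").strip()
--         if not normalized:
--             continue
--         key = normalized.lower()
--         if key in seen:
--             continue
--         seen.add(key)
--         if key in lower_order:
--             known_keys.add(key)
--         else:
--             unknown.append(normalized)
--     return [s for s in _SCRIPT_ORDER if s.lower() in known_keys] + unknown
-- ===== Notes on version B (the rewrite author's own statement) =====
-- stated objective: simpler
-- what changed: B drops A's order_index dict and sorted() call entirely: it dedupes on the lowercase key in one pass, bucketing keys of table scripts into a set and unknown labels into an appearance-ordered list, then emits the fixed table in its own order followed by the unknowns.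
import Mathlib
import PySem

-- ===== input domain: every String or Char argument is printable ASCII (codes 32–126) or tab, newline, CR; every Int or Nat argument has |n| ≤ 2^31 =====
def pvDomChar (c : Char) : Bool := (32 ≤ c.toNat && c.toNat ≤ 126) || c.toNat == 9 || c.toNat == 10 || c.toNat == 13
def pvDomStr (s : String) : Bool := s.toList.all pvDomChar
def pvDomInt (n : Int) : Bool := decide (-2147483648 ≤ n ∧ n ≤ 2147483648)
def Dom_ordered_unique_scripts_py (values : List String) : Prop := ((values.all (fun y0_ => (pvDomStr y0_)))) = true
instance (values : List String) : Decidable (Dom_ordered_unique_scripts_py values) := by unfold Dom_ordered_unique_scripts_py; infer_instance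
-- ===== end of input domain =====

-- B replaces A's sort (canonical labels keyed through an index dict) by a direct ordered
-- traversal of the fixed table plus an appearance-ordered unknown bucket; objective: simpler.

-- ===== PORT A =====
def pvScriptOrder : List String :=
  ["Latin", "Cyrillic", "Greek", "Arabic", "Hebrew",
   "Devanagari", "Thai", "Japanese", "Korean", "Chinese"]

-- order_index = {name: idx for idx, name in enumerate(_SCRIPT_ORDER)}
def pvOrderIndex : PySem.Dict String Int :=
  (PySem.List.enumerate pvScriptOrder 0).foldl (fun d p => d.insert p.2 p.1) PySem.Dict.empty

-- one iteration of A's for-loop over (seen, canonical)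
def pvStepA (st : PySem.Set String × List String) (value : String) :
    PySem.Set String × List String :=
  let normalized := PySem.Str.strip (if value == "" then "" else value)
  if normalized == "" then st
  else
    let label := (pvScriptOrder.find?
      (fun s => PySem.Str.lower s == PySem.Str.lower normalized)).getD normalized
    let key := PySem.Str.lower label
    if PySem.Set.contains st.1 key then st
    else (PySem.Set.add st.1 key, st.2 ++ [label])

def ordered_unique_scripts_py (values : List String) : List String :=
  let st := values.foldl pvStepA (PySem.Set.empty, [])
  PySem.List.sorted st.2 (fun v => pvOrderIndex.getD v (PySem.List.len pvScriptOrder)) false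

-- ===== PORT B =====
-- lower_order = [s.lower() for s in _SCRIPT_ORDER]
def pvLowerOrder : List String := pvScriptOrder.map PySem.Str.lower

-- one iteration of B's for-loop over (seen, known_keys, unknown)
def pvStepB (st : PySem.Set String × PySem.Set String × List String) (value : String) :
    PySem.Set String × PySem.Set String × List String :=
  let normalized := PySem.Str.strip (if value == "" then "" else value)
  if normalized == "" then st
  else
    let key := PySem.Str.lower normalized
    if PySem.Set.contains st.1 key then st
    else
      if pvLowerOrder.contains key then
        (PySem.Set.add st.1 key, PySem.Set.add st.2.1 key, st.2.2)
      else
        (PySem.Set.add st.1 key, st.2.1, st.2.2 ++ [normalized])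

def ordered_unique_scripts_py_alt (values : List String) : List String :=
  let st := values.foldl pvStepB (PySem.Set.empty, PySem.Set.empty, [])
  pvScriptOrder.filter (fun s => PySem.Set.contains st.2.1 (PySem.Str.lower s)) ++ st.2.2

-- ===== PRECONDITION & SPEC =====
def Spec_ordered_unique_scripts_py (values : List String) (out : List String) : Prop := out = ordered_unique_scripts_py_alt values
instance (values : List String) (out : List String) : Decidable (Spec_ordered_unique_scripts_py values out) := by unfold Spec_ordered_unique_scripts_py; infer_instance

-- ===== CLAIM (what is proved, stated in full; the proofs are below) =====
def Claim_equal_ordered_unique_scripts_py : Prop := ∀ (values : List String), Dom_ordered_unique_scripts_py values → Spec_ordered_unique_scripts_py values (ordered_unique_scripts_py values)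

-- ===== LEMMAS AND PROOFS =====

-- A's sort key
def pvKey (v : String) : Int := pvOrderIndex.getD v (PySem.List.len pvScriptOrder)

theorem pvKey_notin (v : String) (hv : v ∉ pvScriptOrder) : pvKey v = 10 := by
  have : ¬ (v = "Latin") ∧ ¬ (v = "Cyrillic") ∧ ¬ (v = "Greek") ∧ ¬ (v = "Arabic") ∧
      ¬ (v = "Hebrew") ∧ ¬ (v = "Devanagari") ∧ ¬ (v = "Thai") ∧ ¬ (v = "Japanese") ∧
      ¬ (v = "Korean") ∧ ¬ (v = "Chinese") := by
    simp [pvScriptOrder] at hv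
    tauto
  obtain ⟨h1, h2, h3, h4, h5, h6, h7, h8, h9, h10⟩ := this
  have b1 : ("Latin" == v) = false := beq_eq_false_iff_ne.2 (Ne.symm h1)
  have b2 : ("Cyrillic" == v) = false := beq_eq_false_iff_ne.2 (Ne.symm h2)
  have b3 : ("Greek" == v) = false := beq_eq_false_iff_ne.2 (Ne.symm h3)
  have b4 : ("Arabic" == v) = false := beq_eq_false_iff_ne.2 (Ne.symm h4)
  have b5 : ("Hebrew" == v) = false := beq_eq_false_iff_ne.2 (Ne.symm h5)
  have b6 : ("Devanagari" == v) = false := beq_eq_false_iff_ne.2 (Ne.symm h6)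
  have b7 : ("Thai" == v) = false := beq_eq_false_iff_ne.2 (Ne.symm h7)
  have b8 : ("Japanese" == v) = false := beq_eq_false_iff_ne.2 (Ne.symm h8)
  have b9 : ("Korean" == v) = false := beq_eq_false_iff_ne.2 (Ne.symm h9)
  have b10 : ("Chinese" == v) = false := beq_eq_false_iff_ne.2 (Ne.symm h10)
  simp [pvKey, pvOrderIndex, pvScriptOrder, PySem.Dict.getD, PySem.Dict.get?,
    PySem.List.enumerate, PySem.Dict.insert, PySem.Dict.empty, PySem.List.len,
    List.find?, b1, b2, b3, b4, b5, b6, b7, b8, b9, b10]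

theorem pvKey_pairwise : pvScriptOrder.Pairwise (fun a b => pvKey a < pvKey b) := by decide

theorem pvKey_lt (y : String) (hy : y ∈ pvScriptOrder) : pvKey y < 10 := by
  fin_cases hy <;> decide

theorem pvLower_inj (s t : String) (hs : s ∈ pvScriptOrder) (ht : t ∈ pvScriptOrder)
    (h : PySem.Str.lower s = PySem.Str.lower t) : s = t := by
  fin_cases hs <;> fin_cases ht <;> first | rfl | (exfalso; revert h; decide)

-- inserting x into as ++ bs stays inside as ++ [x]-at-the-border when x goes before all of bs
theorem insertBy_append_of_all_before {α : Type} (p : α → α → Bool) (x : α) (as bs : List α)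
    (h : ∀ b ∈ bs, p x b = true) :
    PySem.List.insertBy p x (as ++ bs) = PySem.List.insertBy p x as ++ bs := by
  induction as with
  | nil =>
    cases bs with
    | nil => rfl
    | cons b bs' => simp [PySem.List.insertBy, h b (by simp)]
  | cons a as' ih =>
    by_cases hpa : p x a = true
    · simp [PySem.List.insertBy, hpa]
    · simp only [List.cons_append, PySem.List.insertBy, hpa]
      simp [ih]

theorem tbl_filter_insert (k : String → Int) (tbl : List String)
    (hp : tbl.Pairwise (fun a b => k a < k b)) (x : String) (hx : x ∈ tbl)
    (l : List String) (hxl : x ∉ l) :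
    tbl.filter (fun s => decide (s ∈ l ++ [x])) =
      PySem.List.insertBy (fun a b => decide (k a < k b)) x
        (tbl.filter (fun s => decide (s ∈ l))) := by
  induction tbl with
  | nil => simp at hx
  | cons t ts ih =>
    have hpts : ts.Pairwise (fun a b => k a < k b) := hp.of_cons
    have hlt : ∀ y ∈ ts, k t < k y := fun y hy => List.rel_of_pairwise_cons hp hy
    by_cases htx : t = x
    · subst htx
      have htl : ¬ (t ∈ l) := hxl
      have hts : ∀ s ∈ ts, s ≠ t := by
        intro s hs he; exact absurd (he ▸ hlt s hs) (lt_irrefl _)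
      have hfilt : ts.filter (fun s => decide (s ∈ l ++ [t])) = ts.filter (fun s => decide (s ∈ l)) := by
        apply List.filter_congr
        intro s hs
        simp [hts s hs]
      have hm1 : (decide (t ∈ l ++ [t])) = true := by simp
      have hm2 : (decide (t ∈ l)) = false := by simp [htl]
      rw [List.filter_cons, List.filter_cons, hm1, hm2, if_pos rfl, hfilt]
      have : (if false = true then t :: ts.filter (fun s => decide (s ∈ l))
          else ts.filter (fun s => decide (s ∈ l))) = ts.filter (fun s => decide (s ∈ l)) := by simp
      rw [this]
      -- goal: t :: filter = insertBy _ t (filter)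
      cases hfe : ts.filter (fun s => decide (s ∈ l)) with
      | nil => simp [PySem.List.insertBy]
      | cons y ys =>
        have hy : y ∈ ts := List.mem_of_mem_filter (hfe ▸ List.mem_cons_self)
        have hk : decide (k t < k y) = true := by simp [hlt y hy]
        simp [PySem.List.insertBy, hk]
    · have hxts : x ∈ ts := by
        rcases List.mem_cons.1 hx with h | h
        · exact absurd h.symm htx
        · exact h
      have hmt : (decide (t ∈ l ++ [x])) = (decide (t ∈ l)) := by simp [htx]
      by_cases htl : t ∈ l
      · have h1 : (decide (t ∈ l)) = true := by simp [htl]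
        have hkxt : (decide (k x < k t)) = false := by
          have := hlt x hxts; simp; omega
        rw [List.filter_cons, List.filter_cons, hmt, h1, if_pos rfl, if_pos rfl,
          ih hpts hxts]
        simp [PySem.List.insertBy, hkxt]
      · have h1 : (decide (t ∈ l)) = false := by simp [htl]
        rw [List.filter_cons, List.filter_cons, hmt, h1]
        have e : ∀ (L : List String), (if false = true then t :: L else L) = L := by simp
        rw [e, e]
        exact ih hpts hxts

-- the stable sort of a nodup list whose elements are table entries (distinct keys < M)
-- or have key exactly M splits into table order followed by first-appearance order
theorem sorted_split (k : String → Int) (tbl : List String) (M : Int)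
    (hp : tbl.Pairwise (fun a b => k a < k b)) (hM : ∀ y ∈ tbl, k y < M)
    (l : List String) (hnd : l.Nodup) (h2 : ∀ c ∈ l, c ∈ tbl ∨ k c = M) :
    PySem.List.sorted l k false =
      tbl.filter (fun s => decide (s ∈ l)) ++ l.filter (fun c => decide (c ∉ tbl)) := by
  induction l using List.reverseRecOn with
  | nil => simp [PySem.List.sorted_eq_foldl_insertBy]
  | append_singleton l x ih =>
    have hnd' : l.Nodup := hnd.of_append_left
    have hxl : x ∉ l := by
      have := List.disjoint_of_nodup_append hnd
      intro hc; exact this hc List.mem_cons_self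
    have h2' : ∀ c ∈ l, c ∈ tbl ∨ k c = M := fun c hc => h2 c (by simp [hc])
    have ihe := ih hnd' h2'
    have hstep : PySem.List.sorted (l ++ [x]) k false =
        PySem.List.insertBy (fun a b => decide (k a < k b)) x (PySem.List.sorted l k false) := by
      simp [PySem.List.sorted_eq_foldl_insertBy, List.foldl_append]
    rcases h2 x (by simp) with hx | hx
    · -- x is a table entry
      have hall : ∀ b ∈ l.filter (fun c => decide (c ∉ tbl)),
          decide (k x < k b) = true := by
        intro b hb
        have hbl : b ∈ l := List.mem_of_mem_filter hb
        have hbt : b ∉ tbl := by simpa using List.of_mem_filter hb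
        have hbM : k b = M := (h2' b hbl).resolve_left hbt
        have := hM x hx
        simp; omega
      rw [hstep, ihe, insertBy_append_of_all_before _ _ _ _ hall,
        ← tbl_filter_insert k tbl hp x hx l hxl]
      have : (l ++ [x]).filter (fun c => decide (c ∉ tbl)) =
          l.filter (fun c => decide (c ∉ tbl)) := by
        simp [List.filter_append, hx]
      rw [this]
    · -- x is unknown: it goes to the very end
      have hall : ∀ y ∈ PySem.List.sorted l k false, (fun a b => decide (k a < k b)) x y = false := by
        intro y hy
        have hyl : y ∈ l := (PySem.List.mem_sorted _ _ _ _).1 hy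
        rcases h2' y hyl with h | h
        · have := hM y h; simp; omega
        · simp; omega
      rw [hstep, PySem.List.insertBy_of_forall_not_before _ _ _ hall, ihe]
      have hxt : x ∉ tbl := by
        intro hc; have := hM x hc; omega
      have e1 : tbl.filter (fun s => decide (s ∈ l ++ [x])) =
          tbl.filter (fun s => decide (s ∈ l)) := by
        apply List.filter_congr
        intro s hs
        have : s ≠ x := by intro he; exact hxt (he ▸ hs)
        simp [this]
      have e2 : (l ++ [x]).filter (fun c => decide (c ∉ tbl)) =
          l.filter (fun c => decide (c ∉ tbl)) ++ [x] := by
        simp [List.filter_append, hxt]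
      rw [e1, e2, List.append_assoc]

-- loop invariant tying A's (seen, canonical) to B's (seen, known, unknown)
def pvInv (seen : PySem.Set String) (canonical : List String)
    (known : PySem.Set String) (unknown : List String) : Prop :=
  (∀ c ∈ canonical, PySem.Str.lower c ∈ seen) ∧
  canonical.Nodup ∧
  (∀ s ∈ pvScriptOrder, (s ∈ canonical ↔ PySem.Str.lower s ∈ known)) ∧
  canonical.filter (fun c => decide (c ∉ pvScriptOrder)) = unknown

-- A's canonical label always has A's key: lower(label) = lower(normalized)
theorem pvlabel_lower (N : String) :
    PySem.Str.lower ((pvScriptOrder.find?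
      (fun s => PySem.Str.lower s == PySem.Str.lower N)).getD N) = PySem.Str.lower N := by
  cases hf : pvScriptOrder.find? (fun s => PySem.Str.lower s == PySem.Str.lower N) with
  | none => simp
  | some s0 =>
    have := List.find?_some hf
    simp only [Option.getD_some]
    simpa using this

theorem pv_loop (values : List String) :
    ∀ seen canonical known unknown, pvInv seen canonical known unknown →
    (values.foldl pvStepA (seen, canonical)).1 = (values.foldl pvStepB (seen, known, unknown)).1 ∧
    pvInv (values.foldl pvStepA (seen, canonical)).1
          (values.foldl pvStepA (seen, canonical)).2
          (values.foldl pvStepB (seen, known, unknown)).2.1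
          (values.foldl pvStepB (seen, known, unknown)).2.2 := by
  induction values with
  | nil => intro seen canonical known unknown hInv; exact ⟨rfl, hInv⟩
  | cons value rest ih =>
    intro seen canonical known unknown hInv
    obtain ⟨h1, h2, h3, h4⟩ := hInv
    simp only [List.foldl_cons]
    by_cases hne : PySem.Str.strip (if value = "" then "" else value) = ""
    · have ea : pvStepA (seen, canonical) value = (seen, canonical) := by
        simp [pvStepA, hne]
      have eb : pvStepB (seen, known, unknown) value = (seen, known, unknown) := by
        simp [pvStepB, hne]
      rw [ea, eb]; exact ih _ _ _ _ ⟨h1, h2, h3, h4⟩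
    · by_cases hseenM : PySem.Str.lower (PySem.Str.strip (if value = "" then "" else value)) ∈ seen
      · have ea : pvStepA (seen, canonical) value = (seen, canonical) := by
          simp [pvStepA, hne, pvlabel_lower, PySem.Set.contains, hseenM]
        have eb : pvStepB (seen, known, unknown) value = (seen, known, unknown) := by
          simp [pvStepB, hne, PySem.Set.contains, hseenM]
        rw [ea, eb]; exact ih _ _ _ _ ⟨h1, h2, h3, h4⟩
      · -- new key ln = lower normalized
        have hInv1' : ∀ newlab,
            PySem.Str.lower newlab =
              PySem.Str.lower (PySem.Str.strip (if value = "" then "" else value)) →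
            ∀ c ∈ canonical ++ [newlab],
            PySem.Str.lower c ∈ PySem.Set.add seen
              (PySem.Str.lower (PySem.Str.strip (if value = "" then "" else value))) := by
          intro newlab hnl c hc
          rcases List.mem_append.1 hc with hc | hc
          · exact (PySem.Set.mem_add _ _ _).2 (Or.inl (h1 c hc))
          · simp only [List.mem_singleton] at hc
            subst hc
            exact (PySem.Set.mem_add _ _ _).2 (Or.inr hnl)
        have hnotc : ∀ newlab,
            PySem.Str.lower newlab =
              PySem.Str.lower (PySem.Str.strip (if value = "" then "" else value)) →
            newlab ∉ canonical := by
          intro newlab hnl hc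
          exact hseenM (hnl ▸ h1 newlab hc)
        cases hf : pvScriptOrder.find? (fun s => PySem.Str.lower s ==
            PySem.Str.lower (PySem.Str.strip (if value = "" then "" else value))) with
        | some s0 =>
          have hs0 : s0 ∈ pvScriptOrder := List.mem_of_find?_eq_some hf
          have hls0 : PySem.Str.lower s0 =
              PySem.Str.lower (PySem.Str.strip (if value = "" then "" else value)) := by
            have := List.find?_some hf
            simpa using this
          have hcontM : PySem.Str.lower (PySem.Str.strip (if value = "" then "" else value))
              ∈ pvLowerOrder := by
            simp only [pvLowerOrder, List.mem_map]
            exact ⟨s0, hs0, hls0⟩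
          have ea : pvStepA (seen, canonical) value =
              (PySem.Set.add seen
                (PySem.Str.lower (PySem.Str.strip (if value = "" then "" else value))),
               canonical ++ [s0]) := by
            simp [pvStepA, hne, hf, hls0, PySem.Set.contains, hseenM]
          have eb : pvStepB (seen, known, unknown) value =
              (PySem.Set.add seen
                (PySem.Str.lower (PySem.Str.strip (if value = "" then "" else value))),
               PySem.Set.add known
                (PySem.Str.lower (PySem.Str.strip (if value = "" then "" else value))),
               unknown) := by
            simp [pvStepB, hne, PySem.Set.contains, hseenM, hcontM]
          rw [ea, eb]
          apply ih
          refine ⟨hInv1' s0 hls0, ?_, ?_, ?_⟩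
          · refine h2.append (List.nodup_singleton _) ?_
            intro a ha hb
            simp only [List.mem_singleton] at hb
            subst hb
            exact hnotc _ hls0 ha
          · intro s hs
            have hiff : (s = s0) ↔ (PySem.Str.lower s =
                PySem.Str.lower (PySem.Str.strip (if value = "" then "" else value))) := by
              constructor
              · intro he; rw [he]; exact hls0
              · intro he; exact pvLower_inj s s0 hs hs0 (he.trans hls0.symm)
            rw [PySem.Set.mem_add]
            simp only [List.mem_append, List.mem_singleton]
            rw [h3 s hs, hiff]
          · simp only [List.filter_append, h4]
            simp [hs0]
        | none =>
          have hnotin : PySem.Str.strip (if value = "" then "" else value) ∉ pvScriptOrder := by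
            intro hc
            have := List.find?_eq_none.1 hf _ hc
            simp at this
          have hcontM : PySem.Str.lower (PySem.Str.strip (if value = "" then "" else value))
              ∉ pvLowerOrder := by
            simp only [pvLowerOrder, List.mem_map]
            rintro ⟨s, hs, hls⟩
            have := List.find?_eq_none.1 hf s hs
            simp [hls] at this
          have ea : pvStepA (seen, canonical) value =
              (PySem.Set.add seen
                (PySem.Str.lower (PySem.Str.strip (if value = "" then "" else value))),
               canonical ++ [PySem.Str.strip (if value = "" then "" else value)]) := by
            simp [pvStepA, hne, hf, PySem.Set.contains, hseenM]
          have eb : pvStepB (seen, known, unknown) value =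
              (PySem.Set.add seen
                (PySem.Str.lower (PySem.Str.strip (if value = "" then "" else value))),
               known,
               unknown ++ [PySem.Str.strip (if value = "" then "" else value)]) := by
            simp [pvStepB, hne, PySem.Set.contains, hseenM, hcontM]
          rw [ea, eb]
          apply ih
          refine ⟨hInv1' _ rfl, ?_, ?_, ?_⟩
          · refine h2.append (List.nodup_singleton _) ?_
            intro a ha hb
            simp only [List.mem_singleton] at hb
            subst hb
            exact hnotc _ rfl ha
          · intro s hs
            have hsn : s ≠ PySem.Str.strip (if value = "" then "" else value) := by
              intro he; exact hnotin (he ▸ hs)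
            simp only [List.mem_append, List.mem_singleton, hsn, or_false]
            exact h3 s hs
          · simp only [List.filter_append, h4]
            simp [hnotin]

-- ===== VERDICT (by name: the statement is the Claim_ definition above) =====
theorem ordered_unique_scripts_py_spec : Claim_equal_ordered_unique_scripts_py := by
  unfold Claim_equal_ordered_unique_scripts_py
  intro values _
  unfold Spec_ordered_unique_scripts_py ordered_unique_scripts_py ordered_unique_scripts_py_alt
  have hInit : pvInv PySem.Set.empty [] PySem.Set.empty [] := by
    refine ⟨by simp, List.nodup_nil, ?_, by simp⟩
    intro s _
    simp [PySem.Set.empty]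
  obtain ⟨hseen, h1, h2, h3, h4⟩ := pv_loop values PySem.Set.empty [] PySem.Set.empty [] hInit
  set stA := values.foldl pvStepA (PySem.Set.empty, []) with hA
  set stB := values.foldl pvStepB (PySem.Set.empty, PySem.Set.empty, []) with hB
  show PySem.List.sorted stA.2 pvKey false =
    pvScriptOrder.filter (fun s => PySem.Set.contains stB.2.1 (PySem.Str.lower s)) ++ stB.2.2
  have hsplit := sorted_split pvKey pvScriptOrder 10 pvKey_pairwise pvKey_lt stA.2 h2
    (fun c _ => by
      by_cases hc : c ∈ pvScriptOrder
      · exact Or.inl hc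
      · exact Or.inr (pvKey_notin c hc))
  rw [hsplit, h4]
  congr 1
  apply List.filter_congr
  intro s hs
  rw [PySem.Set.contains, List.contains_eq_mem, decide_eq_decide]
  exact h3 s hs
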